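-- pv_equiv track=rewrite | github.com/caiy0233/agentUniverse | agentuniverse/agent/work_pattern/optimization_work_pattern.py | _make_batches_itertools
-- ===== SOURCE A (Python) =====
-- from typing import Optional, List, Dict, Union, Any
-- import itertools
--
-- def _make_batches_itertools(samples: List[Union[str, Dict[str, Any]]], batch_size: int, max_iterations: int) -> List[List[Union[str, Dict[str, Any]]]]:
--     """
--     使用 itertools.cycle 实现循环批次生成。
--     """
--     if not samples or batch_size <= 0 or max_iterations <= 0:
--         return []
--
--     batches: List[List[Union[str, Dict[str, Any]]]] = []
--     # 创建一个可以无限循环提供样本的迭代器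
--     sample_cycler = itertools.cycle(samples)
--
--     for _ in range(max_iterations):
--         # 从迭代器中取出 batch_size 个样本来组成一个批次
--         batch = [next(sample_cycler) for _ in range(batch_size)]
--         batches.append(batch)
--
--     return batches
-- ===== SOURCE B (Python) =====
-- from typing import Optional, List, Dict, Union, Any
--
-- def _make_batches_itertools(samples: List[Union[str, Dict[str, Any]]], batch_size: int, max_iterations: int) -> List[List[Union[str, Dict[str, Any]]]]:
--     """Materialize the whole cycled stream once, then chunk it into batches."""
--     if not samples or batch_size <= 0 or max_iterations <= 0:
--         return []
--     n = len(samples)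
--     total = max_iterations * batch_size
--     flat = [samples[i % n] for i in range(total)]
--     return [flat[i:i + batch_size] for i in range(0, total, batch_size)]
-- ===== Notes on version B (the rewrite author's own statement) =====
-- stated objective: alternative
-- what changed: B replaces A's per-batch stateful next() draws from itertools.cycle with one linear materialization of the whole cycled stream (index i % n) followed by a separate chunking pass.
import Mathlib
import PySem

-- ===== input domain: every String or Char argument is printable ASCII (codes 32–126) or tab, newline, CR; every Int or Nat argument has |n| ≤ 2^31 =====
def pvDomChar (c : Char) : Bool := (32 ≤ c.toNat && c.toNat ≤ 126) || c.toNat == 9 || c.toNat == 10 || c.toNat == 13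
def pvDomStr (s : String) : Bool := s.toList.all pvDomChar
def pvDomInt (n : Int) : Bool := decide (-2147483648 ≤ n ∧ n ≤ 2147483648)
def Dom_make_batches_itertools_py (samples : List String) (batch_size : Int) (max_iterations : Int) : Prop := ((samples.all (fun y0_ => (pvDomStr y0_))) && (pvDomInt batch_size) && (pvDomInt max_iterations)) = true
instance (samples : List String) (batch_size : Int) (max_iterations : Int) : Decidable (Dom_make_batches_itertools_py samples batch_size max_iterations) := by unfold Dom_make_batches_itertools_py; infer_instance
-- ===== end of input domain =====

-- B replaces A's per-batch stateful draws from itertools.cycle with one linear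
-- materialization of the cycled stream followed by a separate chunking pass (objective: alternative).

-- ===== PORT A =====
-- itertools.cycle(samples) is modeled exactly by a counter c: each next() yields
-- samples[c % len(samples)] (always in range since samples ≠ [] past the guard) and increments c.
def make_batches_itertools_py (samples : List String) (batch_size : Int) (max_iterations : Int) : List (List String) :=
  if samples = [] ∨ batch_size ≤ 0 ∨ max_iterations ≤ 0 then []
  else
    let st := (PySem.List.pyRange 0 max_iterations 1).foldl
      (fun (st : List (List String) × Nat) _ =>
        let inner := (PySem.List.pyRange 0 batch_size 1).foldl
          (fun (st2 : List String × Nat) _ =>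
            (st2.1 ++ [samples.getD (st2.2 % samples.length) ""], st2.2 + 1))
          (([] : List String), st.2)
        (st.1 ++ [inner.1], inner.2))
      (([] : List (List String)), 0)
    st.1

-- ===== PORT B =====
-- flat = [samples[i % n] for i in range(total)]; range(total) over a nonnegative total is List.range,
-- and i % n is always in range so the index read is exact.
def pvFlat (samples : List String) (total : Nat) : List String :=
  (List.range total).map (fun i => samples.getD (i % samples.length) "")

def make_batches_itertools_py_alt (samples : List String) (batch_size : Int) (max_iterations : Int) : List (List String) :=
  if samples = [] ∨ batch_size ≤ 0 ∨ max_iterations ≤ 0 then []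
  else
    let flat := pvFlat samples (max_iterations * batch_size).toNat
    (PySem.List.pyRange 0 (max_iterations * batch_size) batch_size).map
      (fun i => PySem.List.slice flat (some i) (some (i + batch_size)))

-- ===== PRECONDITION & SPEC =====
def Spec_make_batches_itertools_py (samples : List String) (batch_size : Int) (max_iterations : Int) (out : List (List String)) : Prop := out = make_batches_itertools_py_alt samples batch_size max_iterations
instance (samples : List String) (batch_size : Int) (max_iterations : Int) (out : List (List String)) : Decidable (Spec_make_batches_itertools_py samples batch_size max_iterations out) := by unfold Spec_make_batches_itertools_py; infer_instance

-- ===== CLAIM (what is proved, stated in full; the proofs are below) =====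
def Claim_equal_make_batches_itertools_py : Prop := ∀ (samples : List String) (batch_size : Int) (max_iterations : Int), Dom_make_batches_itertools_py samples batch_size max_iterations → Spec_make_batches_itertools_py samples batch_size max_iterations (make_batches_itertools_py samples batch_size max_iterations)

-- ===== LEMMAS AND PROOFS =====

-- A's inner loop: appends one batch element per iteration, advancing the cycle counter.
theorem pv_inner_fold (f : Nat → String) :
    ∀ (l : List Int) (acc : List String) (c : Nat),
    l.foldl (fun (st2 : List String × Nat) _ => (st2.1 ++ [f st2.2], st2.2 + 1)) (acc, c)
      = (acc ++ (List.range l.length).map (fun k => f (c + k)), c + l.length) := by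
  intro l
  induction l with
  | nil => intro acc c; simp
  | cons x t ih =>
      intro acc c
      simp only [List.foldl_cons, ih, List.length_cons, List.range_succ_eq_map,
        List.map_cons, List.map_map, Nat.add_zero, Prod.mk.injEq]
      refine ⟨?_, by omega⟩
      simp only [List.append_assoc, List.singleton_append]
      congr 1
      congr 1
      exact List.map_congr_left (fun k _ => by
        simp only [Function.comp_apply]; congr 1; omega)

-- one slice of the range-generated flat list is one batch of the matrix
theorem pv_slice_chunk (f : Nat → String) (m b j : Nat) (hj : j < m) :
    (((List.range (m * b)).map f).drop (b * j)).take b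
      = (List.range b).map (fun k => f (b * j + k)) := by
  have h1 : b * j + b ≤ m * b := by nlinarith
  apply List.ext_getElem
  · simp; omega
  · intro k hk hk2
    simp only [List.getElem_take, List.getElem_drop, List.getElem_map, List.getElem_range]

theorem make_batches_itertools_py_spec : Claim_equal_make_batches_itertools_py := by
  intro samples bs mi _
  unfold Spec_make_batches_itertools_py make_batches_itertools_py make_batches_itertools_py_alt
  by_cases hguard : samples = [] ∨ bs ≤ 0 ∨ mi ≤ 0
  · simp [hguard]
  · simp only [if_neg hguard]
    push_neg at hguard
    obtain ⟨hs, hbs, hmi⟩ := hguard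
    set f : Nat → String := fun c => samples.getD (c % samples.length) "" with hf
    set b : Nat := bs.toNat with hb
    have hb1 : 1 ≤ b := by omega
    -- characterize A's nested fold
    have hlen_bs : (PySem.List.pyRange 0 bs 1).length = b := by
      rw [PySem.List.length_pyRange_one]; omega
    have outer : ∀ (l : List Int) (acc : List (List String)) (c : Nat),
        l.foldl (fun (st : List (List String) × Nat) _ =>
          let inner := (PySem.List.pyRange 0 bs 1).foldl
            (fun (st2 : List String × Nat) _ =>
              (st2.1 ++ [samples.getD (st2.2 % samples.length) ""], st2.2 + 1))
            (([] : List String), st.2)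
          (st.1 ++ [inner.1], inner.2)) (acc, c)
        = (acc ++ (List.range l.length).map
            (fun j => (List.range b).map (fun k => f (c + j * b + k))), c + l.length * b) := by
      intro l
      induction l with
      | nil => intro acc c; simp
      | cons x t ih =>
          intro acc c
          simp only [List.foldl_cons]
          rw [show (fun (st2 : List String × Nat) _ =>
              (st2.1 ++ [samples.getD (st2.2 % samples.length) ""], st2.2 + 1))
            = (fun (st2 : List String × Nat) (_ : Int) => (st2.1 ++ [f st2.2], st2.2 + 1)) from rfl]
          rw [pv_inner_fold f (PySem.List.pyRange 0 bs 1) [] c, hlen_bs]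
          simp only
          rw [ih]
          simp only [List.length_cons, List.range_succ_eq_map, List.map_cons, List.map_map,
            List.nil_append, Prod.mk.injEq]
          refine ⟨?_, by ring⟩
          simp only [List.append_assoc, List.singleton_append]
          congr 1
          congr 1
          · exact List.map_congr_left (fun k _ => congrArg f (by omega))
          · exact List.map_congr_left (fun j _ => by
              simp only [Function.comp_apply]
              exact List.map_congr_left (fun k _ => congrArg f (by rw [Nat.succ_eq_add_one]; ring)))
    rw [outer (PySem.List.pyRange 0 mi 1) [] 0]
    simp only [List.nil_append, PySem.List.length_pyRange_one, Int.sub_zero]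
    -- characterize B
    have h1 : ((mi.toNat : Int)) = mi := Int.toNat_of_nonneg (by omega)
    have h2 : ((b : Int)) = bs := Int.toNat_of_nonneg (by omega)
    have htot : (mi * bs).toNat = mi.toNat * b := by
      have h3 : mi * bs = ((mi.toNat * b : Nat) : Int) := by push_cast [h1, h2]; ring
      rw [h3, Int.toNat_natCast]
    have hmb : (0 : Int) < mi * bs := mul_pos hmi hbs
    have hcount : (if (0 : Int) < mi * bs then ((mi * bs - 0 + bs - 1) / bs).toNat else 0)
        = mi.toNat := by
      rw [if_pos hmb, show mi * bs - 0 + bs - 1 = (bs - 1) + mi * bs from by ring,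
        Int.add_mul_ediv_right _ _ (by omega : bs ≠ 0),
        Int.ediv_eq_zero_of_lt (by omega) (by omega)]
      simp
    rw [PySem.List.pyRange_of_pos 0 (mi * bs) hbs, hcount, List.map_map]
    refine List.map_congr_left (fun j hj => ?_)
    have hj' : j < mi.toNat := List.mem_range.mp hj
    simp only [Function.comp_apply, zero_add]
    have hcast : bs * (j : Int) = ((b * j : Nat) : Int) := by push_cast [h2]; ring
    have hcast2 : bs * (j : Int) + bs = ((b * j + b : Nat) : Int) := by push_cast [h2]; ring
    rw [hcast2, hcast, PySem.List.slice_natCast,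
      show b * j + b - b * j = b from by omega,
      show pvFlat samples (mi * bs).toNat = (List.range (mi.toNat * b)).map f from by
        rw [pvFlat, htot],
      pv_slice_chunk f mi.toNat b j hj']
    exact List.map_congr_left (fun k _ => congrArg f (by simp; ring))
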